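-- pv_equiv track=rewrite | github.com/herospYL/ads-data-process | generate_synonym.py | _query_rewriter_helper
-- ===== SOURCE A (Python) =====
-- def _query_rewriter_helper(query_terms, synonyms_dict):
--     if len(query_terms) == 0:
--         return []
--
--     if len(query_terms) == 1:
--         if query_terms[0] not in synonyms_dict:
--             return [query_terms[0]]
--         else:
--             return list(synonyms_dict[query_terms[0]])
--
--     prev = _query_rewriter_helper(query_terms[:-1], synonyms_dict)
--     if query_terms[-1] in synonyms_dict:
--         post = synonyms_dict[query_terms[-1]]
--         return [s + '_' + c for s in prev for c in post]  # Permutation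
--     else:
--         return [s + '_' + query_terms[-1] for s in prev]
-- ===== SOURCE B (Python) =====
-- def _query_rewriter_helper(query_terms, synonyms_dict):
--     if not query_terms:
--         return []
--     def options(t):
--         return list(synonyms_dict[t]) if t in synonyms_dict else [t]
--     acc = options(query_terms[0])
--     for t in query_terms[1:]:
--         opts = options(t)
--         acc = [s + '_' + c for s in acc for c in opts]
--     return acc
-- ===== Notes on version B (the rewrite author's own statement) =====
-- stated objective: simpler
-- what changed: Replaces right-to-left recursion (with repeated query_terms[:-1] list copies) by a single iterative left-to-right fold over the terms with an accumulator of joined strings.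
import Mathlib
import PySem

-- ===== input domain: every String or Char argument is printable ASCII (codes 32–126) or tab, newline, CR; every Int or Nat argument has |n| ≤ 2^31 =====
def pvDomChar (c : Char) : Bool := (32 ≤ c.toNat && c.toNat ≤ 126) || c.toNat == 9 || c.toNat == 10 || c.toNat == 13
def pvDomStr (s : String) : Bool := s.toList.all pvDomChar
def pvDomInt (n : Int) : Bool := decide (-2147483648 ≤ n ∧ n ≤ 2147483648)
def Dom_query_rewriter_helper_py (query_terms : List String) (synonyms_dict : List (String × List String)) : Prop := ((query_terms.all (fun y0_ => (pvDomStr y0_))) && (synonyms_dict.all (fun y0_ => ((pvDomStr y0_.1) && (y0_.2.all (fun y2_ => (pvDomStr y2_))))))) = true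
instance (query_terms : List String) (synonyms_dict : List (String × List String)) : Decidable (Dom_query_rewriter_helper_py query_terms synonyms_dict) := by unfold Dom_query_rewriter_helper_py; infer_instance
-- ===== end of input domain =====

-- B replaces A's right-to-left recursion (repeated query_terms[:-1] copies) by one
-- left-to-right fold with an accumulator; objective: simpler.

-- ===== PORT A =====
-- dict membership/lookup = first match in the association list (Python dict lookup)
def query_rewriter_helper_py (query_terms : List String) (synonyms_dict : List (String × List String)) : List String :=
  if h0 : query_terms.length = 0 then []
  else if query_terms.length = 1 then
    match List.lookup query_terms.headI synonyms_dict with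
    | none => [query_terms.headI]
    | some v => v
  else
    let prev := query_rewriter_helper_py query_terms.dropLast synonyms_dict
    let last := query_terms.getLast (by intro he; simp [he] at h0)
    match List.lookup last synonyms_dict with
    | some post => prev.flatMap (fun s => post.map (fun c => s ++ "_" ++ c))
    | none => prev.map (fun s => s ++ "_" ++ last)
termination_by query_terms.length
decreasing_by simp [List.length_dropLast]; omega

-- ===== PORT B =====
def pvOptions (synonyms_dict : List (String × List String)) (t : String) : List String :=
  match List.lookup t synonyms_dict with
  | some v => v
  | none => [t]

def query_rewriter_helper_py_alt (query_terms : List String) (synonyms_dict : List (String × List String)) : List String :=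
  match query_terms with
  | [] => []
  | t :: rest =>
    rest.foldl
      (fun acc u =>
        let opts := pvOptions synonyms_dict u
        acc.flatMap (fun s => opts.map (fun c => s ++ "_" ++ c)))
      (pvOptions synonyms_dict t)

-- ===== PRECONDITION & SPEC =====
def Spec_query_rewriter_helper_py (query_terms : List String) (synonyms_dict : List (String × List String)) (out : List String) : Prop := out = query_rewriter_helper_py_alt query_terms synonyms_dict
instance (query_terms : List String) (synonyms_dict : List (String × List String)) (out : List String) : Decidable (Spec_query_rewriter_helper_py query_terms synonyms_dict out) := by unfold Spec_query_rewriter_helper_py; infer_instance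

-- ===== CLAIM (what is proved, stated in full; the proofs are below) =====
def Claim_equal_query_rewriter_helper_py : Prop := ∀ (query_terms : List String) (synonyms_dict : List (String × List String)), Dom_query_rewriter_helper_py query_terms synonyms_dict → Spec_query_rewriter_helper_py query_terms synonyms_dict (query_rewriter_helper_py query_terms synonyms_dict)

-- ===== LEMMAS AND PROOFS =====

theorem pvA_singleton (t : String) (d : List (String × List String)) :
    query_rewriter_helper_py [t] d = pvOptions d t := by
  rw [query_rewriter_helper_py]
  simp [pvOptions]
  cases List.lookup t d <;> rfl

theorem pvA_append (l : List String) (x : String) (d : List (String × List String)) (hl : l ≠ []) :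
    query_rewriter_helper_py (l ++ [x]) d =
      (query_rewriter_helper_py l d).flatMap
        (fun s => (pvOptions d x).map (fun c => s ++ "_" ++ c)) := by
  rw [query_rewriter_helper_py]
  have h0 : ¬ (l ++ [x]).length = 0 := by simp
  have h1 : ¬ (l ++ [x]).length = 1 := by
    cases l with
    | nil => exact absurd rfl hl
    | cons a as => simp
  rw [dif_neg h0, if_neg h1]
  have hdrop : (l ++ [x]).dropLast = l := by simp
  have hlast : (l ++ [x]).getLast (by intro he; simp [he] at h0) = x := by
    simp
  rw [hdrop, hlast]
  simp only [pvOptions]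
  cases List.lookup x d with
  | some v => rfl
  | none =>
    rw [List.flatMap_def]
    generalize query_rewriter_helper_py l d = L
    induction L with
    | nil => rfl
    | cons a as ih => simp only [List.map_cons, List.flatten_cons, ih]; rfl

theorem pvB_cons (t : String) (rest : List String) (d : List (String × List String)) :
    query_rewriter_helper_py_alt (t :: rest) d =
      rest.foldl
        (fun acc u => acc.flatMap (fun s => (pvOptions d u).map (fun c => s ++ "_" ++ c)))
        (pvOptions d t) := rfl

theorem pv_main (t : String) (rest : List String) (d : List (String × List String)) :
    query_rewriter_helper_py (t :: rest) d =
      rest.foldl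
        (fun acc u => acc.flatMap (fun s => (pvOptions d u).map (fun c => s ++ "_" ++ c)))
        (pvOptions d t) := by
  induction rest using List.reverseRecOn with
  | nil => simpa using pvA_singleton t d
  | append_singleton r x ih =>
    have h : t :: (r ++ [x]) = (t :: r) ++ [x] := by simp
    rw [h, pvA_append (t :: r) x d (by simp), ih, List.foldl_append]
    rfl

-- ===== VERDICT (by name: the statement is the Claim_ definition above) =====
theorem query_rewriter_helper_py_spec : Claim_equal_query_rewriter_helper_py := by
  intro qt d _
  unfold Spec_query_rewriter_helper_py
  cases qt with
  | nil => rw [query_rewriter_helper_py]; rfl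
  | cons t rest => rw [pv_main, pvB_cons]
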